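-- pv_equiv track=rewrite | github.com/minsuh99/PNU_DS_CodingTestStudy | 03주차/문제2/홍성문_할인 행사.py | solution
-- ===== SOURCE A (Python) =====
-- from collections import Counter
--
-- def solution(want, number, discount):
--     answer = 0
--
--     matching = {}
--
--     for i,product in enumerate(want):
--         matching[product] = number[i]
--
--     for i in range(len(discount)-9):
--         boundary = Counter(discount[i:i+10]) # Counter는 몰라서 검색함..
--
--         if matching == boundary:
--             answer +=1
--
--     return answer
-- ===== SOURCE B (Python) =====
-- def solution(want, number, discount):
--     req = dict(zip(want, number))
--     if len(discount) < 10: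
--         return 0
--     cur = {}
--     for p in discount[:10]:
--         cur[p] = cur.get(p, 0) + 1
--     ans = 1 if cur == req else 0
--     for old, new in zip(discount, discount[10:]):
--         cur[old] -= 1
--         if cur[old] == 0:
--             del cur[old]
--         cur[new] = cur.get(new, 0) + 1
--         if cur == req:
--             ans += 1
--     return ans
-- ===== Notes on version B (the rewrite author's own statement) =====
-- stated objective: faster
-- what changed: A rebuilds a fresh Counter object of each length-10 slice and compares it to the wanted dict; B maintains one sliding count dict incrementally (decrement the leaving item, delete zeros, increment the entering item), avoiding the per-window slice+Counter construction.
import Mathlib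
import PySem

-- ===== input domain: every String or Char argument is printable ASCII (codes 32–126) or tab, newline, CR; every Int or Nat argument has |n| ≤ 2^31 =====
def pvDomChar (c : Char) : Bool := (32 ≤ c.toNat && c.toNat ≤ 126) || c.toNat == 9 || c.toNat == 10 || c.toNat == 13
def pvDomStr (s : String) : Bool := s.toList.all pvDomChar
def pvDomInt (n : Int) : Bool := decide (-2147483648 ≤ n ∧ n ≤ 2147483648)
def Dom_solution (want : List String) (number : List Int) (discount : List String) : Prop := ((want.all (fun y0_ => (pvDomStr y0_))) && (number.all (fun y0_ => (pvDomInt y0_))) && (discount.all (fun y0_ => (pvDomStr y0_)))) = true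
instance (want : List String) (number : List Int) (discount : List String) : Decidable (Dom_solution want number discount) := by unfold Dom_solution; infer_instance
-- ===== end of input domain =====

-- B replaces A's per-window Counter rebuild by one incrementally maintained sliding count dict (alternative decomposition, same exact results).


-- ===== PORT A =====
-- Python's `==` between a dict and a Counter compares the two mappings ignoring order:
-- same key set, same values.  Used by both ports (both Pythons write `==`).
def pyDictEq (d e : PySem.Dict String Int) : Bool :=
  d.keys.all (fun k => e.get? k == d.get? k) && e.keys.all (fun k => d.get? k == e.get? k)

-- `for i, product in enumerate(want): matching[product] = number[i]`
def buildMatchingA : List (Int × String) → List Int → PySem.Dict String Int → PySem.Dict String Int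
  | [], _, d => d
  | (i, p) :: rest, number, d =>
    match PySem.List.pyGet? number i with
    | some v => buildMatchingA rest number (d.insert p v)
    | none => d        -- IndexError in Python; excluded by Pre_solution

def solution (want : List String) (number : List Int) (discount : List String) : Int :=
  let matching := buildMatchingA (PySem.List.enumerate want) number PySem.Dict.empty
  (PySem.List.pyRange 0 ((discount.length : Int) - 9) 1).foldl
    (fun answer i =>
      let boundary := PySem.Dict.counter (PySem.List.slice discount (some i) (some (i + 10)))
      if pyDictEq matching boundary then answer + 1 else answer) 0

-- ===== PORT B =====
-- one step of the sliding window: `old` (= ab.1) leaves, `new` (= ab.2) enters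
-- (`cur[old] -= 1` never raises in Python: `old` is in the current window, hence in cur;
--  `modify` with default 0 is exact there)
def slideStep (req : PySem.Dict String Int) (st : PySem.Dict String Int × Int)
    (ab : String × String) : PySem.Dict String Int × Int :=
  let c1 := st.1.modify ab.1 0 (fun v => v - 1)
  let c2 := if c1.getD ab.1 0 == 0 then c1.erase ab.1 else c1
  let c3 := c2.insert ab.2 (c2.getD ab.2 0 + 1)
  (c3, if pyDictEq c3 req then st.2 + 1 else st.2)

def solution_alt (want : List String) (number : List Int) (discount : List String) : Int :=
  let req := (want.zip number).foldl (fun d pn => d.insert pn.1 pn.2) PySem.Dict.empty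
  if discount.length < 10 then 0
  else
    let cur := (discount.take 10).foldl (fun d p => d.insert p (d.getD p 0 + 1)) PySem.Dict.empty
    let ans : Int := if pyDictEq cur req then 1 else 0
    ((discount.zip (discount.drop 10)).foldl (slideStep req) (cur, ans)).2

-- ===== PRECONDITION & SPEC =====
-- A indexes number[i] for every i < len(want): it raises IndexError iff want is longer than number.
def Pre_solution (want : List String) (number : List Int) (discount : List String) : Prop :=
  want.length ≤ number.length
instance (want : List String) (number : List Int) (discount : List String) : Decidable (Pre_solution want number discount) := by unfold Pre_solution; infer_instance

def pvWitness_solution : List String × List Int × List String :=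
  (["a"], [2], ["a", "a", "b", "a", "a", "a", "a", "a", "a", "a", "a"])

def Spec_solution (want : List String) (number : List Int) (discount : List String) (out : Int) : Prop := out = solution_alt want number discount
instance (want : List String) (number : List Int) (discount : List String) (out : Int) : Decidable (Spec_solution want number discount out) := by unfold Spec_solution; infer_instance

-- ===== CLAIM (what is proved, stated in full; the proofs are below) =====
def Claim_equal_solution : Prop := ∀ (want : List String) (number : List Int) (discount : List String), Dom_solution want number discount → Pre_solution want number discount → Spec_solution want number discount (solution want number discount)


-- ===== LEMMAS AND PROOFS =====

def winsTail {α : Type} : List α → List α → List (List α)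
  | _, [] => []
  | w, b :: rest => (w.tail ++ [b]) :: winsTail (w.tail ++ [b]) rest

theorem counter_get? (xs : List String) (k : String) :
    (PySem.Dict.counter xs).get? k =
      if xs.count k = 0 then none else some ((xs.count k : Int)) := by
  by_cases h : k ∈ xs
  · have hc : xs.count k ≠ 0 := by
      have := List.count_pos_iff.mpr h; omega
    rw [if_neg hc]
    have hmem : k ∈ (PySem.Dict.counter xs).keys := by
      rw [PySem.Dict.keys_counter]; exact (PySem.Set.mem_ofList xs k).mpr h
    have hne : ¬ (PySem.Dict.counter xs).get? k = none := by
      rw [PySem.Dict.get?_eq_none_iff_not_mem_keys]; simpa using hmem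
    obtain ⟨v, hv⟩ := Option.ne_none_iff_exists'.mp hne
    have hD := PySem.Dict.getD_counter xs k
    rw [PySem.Dict.getD_eq_get?_getD, hv] at hD
    simp at hD
    rw [hv, hD]
  · have hc : xs.count k = 0 := List.count_eq_zero.mpr h
    rw [if_pos hc]
    rw [PySem.Dict.get?_eq_none_iff_not_mem_keys, PySem.Dict.keys_counter]
    simpa [PySem.Set.mem_ofList] using h

theorem get?_erase (d : PySem.Dict String Int) (k k' : String) :
    (d.erase k).get? k' = if k' = k then none else d.get? k' := by
  rcases d with ⟨items⟩
  induction items with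
  | nil => simp [PySem.Dict.erase, PySem.Dict.get?]
  | cons p rest ih =>
    simp only [PySem.Dict.erase, PySem.Dict.get?] at ih ⊢
    rw [List.filter_cons]
    by_cases hpk : p.1 = k
    · simp only [hpk, beq_self_eq_true, Bool.not_true, if_neg (by simp : ¬ (false = true))]
      rw [ih]
      by_cases hkk : k' = k
      · simp [hkk]
      · simp only [if_neg hkk]
        rw [List.find?_cons_of_neg (by simp [hpk]; exact fun h => hkk h.symm)]
    · have : (!(p.1 == k)) = true := by simp [hpk]
      rw [this, if_pos rfl]
      by_cases hpk' : p.1 = k'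
      · rw [List.find?_cons_of_pos (by simp [hpk']), List.find?_cons_of_pos (by simp [hpk'])]
        have hkk : ¬ k' = k := fun h => hpk (by rw [hpk', h])
        simp [hkk]
      · rw [List.find?_cons_of_neg (by simp [hpk']), List.find?_cons_of_neg (by simp [hpk'])]
        exact ih

theorem pyDictEq_iff (d e : PySem.Dict String Int) :
    pyDictEq d e = true ↔ ∀ k, d.get? k = e.get? k := by
  unfold pyDictEq
  simp only [Bool.and_eq_true, List.all_eq_true, beq_iff_eq]
  constructor
  · rintro ⟨h1, h2⟩ k
    by_cases hk1 : k ∈ d.keys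
    · exact (h1 k hk1).symm
    · by_cases hk2 : k ∈ e.keys
      · exact h2 k hk2
      · rw [(PySem.Dict.get?_eq_none_iff_not_mem_keys d k).mpr hk1,
            (PySem.Dict.get?_eq_none_iff_not_mem_keys e k).mpr hk2]
  · intro h
    exact ⟨fun k _ => (h k).symm, fun k _ => h k⟩

theorem pyDictEq_of_pointwise (c w d : PySem.Dict String Int)
    (h : ∀ k, c.get? k = w.get? k) : pyDictEq c d = pyDictEq d w := by
  rw [Bool.eq_iff_iff, pyDictEq_iff, pyDictEq_iff]
  constructor
  · intro hcd k; rw [← h k, hcd k]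
  · intro hdw k; rw [h k, hdw k]

theorem step_inv (a b : String) (t : List String) (cur : PySem.Dict String Int)
    (req : PySem.Dict String Int) (ans : Int)
    (hinv : ∀ k, cur.get? k = (PySem.Dict.counter (a :: t)).get? k) :
    ∀ k, (slideStep req (cur, ans) (a, b)).1.get? k
        = (PySem.Dict.counter (t ++ [b])).get? k := by
  intro k
  have hca : cur.get? a = some (((a :: t).count a : Int)) := by
    rw [hinv a, counter_get?]
    simp [List.count_cons]
  have hgD : cur.getD a 0 = (((a :: t).count a : Int)) := by
    rw [PySem.Dict.getD_eq_get?_getD, hca]; rfl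
  have hc1 : ∀ j, (cur.modify a 0 (fun v => v - 1)).get? j
      = if j = a then some ((((a :: t).count a : Int)) - 1) else cur.get? j := by
    intro j
    simp only [PySem.Dict.modify, PySem.Dict.get?_insert, hgD]
  have hc1D : (cur.modify a 0 (fun v => v - 1)).getD a 0 = (((a :: t).count a : Int)) - 1 := by
    rw [PySem.Dict.getD_eq_get?_getD, hc1]; simp
  show ((if (cur.modify a 0 (fun v => v - 1)).getD a 0 == 0
          then (cur.modify a 0 (fun v => v - 1)).erase a
          else cur.modify a 0 (fun v => v - 1)).insert b
        ((if (cur.modify a 0 (fun v => v - 1)).getD a 0 == 0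
          then (cur.modify a 0 (fun v => v - 1)).erase a
          else cur.modify a 0 (fun v => v - 1)).getD b 0 + 1)).get? k
      = (PySem.Dict.counter (t ++ [b])).get? k
  by_cases hta : t.count a = 0
  · have hcond : ((cur.modify a 0 (fun v => v - 1)).getD a 0 == 0) = true := by
      rw [hc1D]; simp [List.count_cons, hta]
    rw [hcond, if_pos rfl]
    have hc2 : ∀ j, ((cur.modify a 0 (fun v => v - 1)).erase a).get? j
        = if j = a then none else cur.get? j := by
      intro j
      rw [get?_erase]
      by_cases hja : j = a
      · simp [hja]
      · simp [hja, hc1]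
    have hc2D : ((cur.modify a 0 (fun v => v - 1)).erase a).getD b 0
        = if b = a then 0 else ((t.count b : Int)) := by
      rw [PySem.Dict.getD_eq_get?_getD, hc2]
      by_cases hba : b = a
      · simp [hba]
      · rw [if_neg hba, if_neg hba, hinv b, counter_get?]
        by_cases hb0 : (a :: t).count b = 0
        · have h2 : t.count b = 0 := by simp [List.count_cons, hba] at hb0; omega
          have hab : ¬ a = b := fun h => hba h.symm
          simp [hb0, h2, hab]
        · have hab : ¬ a = b := fun h => hba h.symm
          have h3 : (a :: t).count b = t.count b := by simp [List.count_cons, hab]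
          rw [if_neg hb0, h3]
          rfl
    rw [PySem.Dict.get?_insert, hc2D, counter_get?]
    by_cases hkb : k = b
    · subst hkb
      have hcnt : (t ++ [k]).count k = t.count k + 1 := by
        simp [List.count_append]
      rw [if_pos rfl, if_neg (show ¬ (t ++ [k]).count k = 0 by omega), hcnt]
      by_cases hka : k = a
      · subst hka
        simp [hta]
      · have hak : ¬ k = a := hka
        simp [hak]
    · rw [if_neg hkb, hc2]
      have hcnt : (t ++ [b]).count k = t.count k := by
        have : List.count k [b] = 0 := by
          simp [List.count_singleton]
          exact fun h => hkb h.symm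
        simp [List.count_append, this]
      by_cases hka : k = a
      · subst hka
        rw [if_pos rfl, if_pos (by omega)]
      · rw [if_neg hka, hinv k, counter_get?, hcnt]
        have hak : ¬ a = k := fun h => hka h.symm
        have : (a :: t).count k = t.count k := by simp [List.count_cons, hak]
        rw [this]
  · have hcond : ((cur.modify a 0 (fun v => v - 1)).getD a 0 == 0) = false := by
      rw [hc1D]
      have h1 : (a :: t).count a = t.count a + 1 := by simp [List.count_cons]
      simp only [beq_eq_false_iff_ne, ne_eq]
      rw [h1]
      push_cast
      omega
    rw [hcond, if_neg (by simp)]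
    have hc1Db : (cur.modify a 0 (fun v => v - 1)).getD b 0
        = if b = a then ((t.count a : Int)) else ((t.count b : Int)) := by
      rw [PySem.Dict.getD_eq_get?_getD, hc1]
      by_cases hba : b = a
      · rw [if_pos hba, hba]
        simp [List.count_cons]
      · rw [if_neg hba, if_neg hba, hinv b, counter_get?]
        have hab' : ¬ a = b := fun h => hba h.symm
        have hab : (a :: t).count b = t.count b := by simp [List.count_cons, hab']
        by_cases hb0 : (a :: t).count b = 0
        · simp [hb0, hab ▸ hb0]
        · rw [if_neg hb0, hab]
          simp
    rw [PySem.Dict.get?_insert, hc1Db, counter_get?]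
    by_cases hkb : k = b
    · subst hkb
      have hcnt : (t ++ [k]).count k = t.count k + 1 := by simp [List.count_append]
      rw [if_pos rfl, if_neg (show ¬ (t ++ [k]).count k = 0 by omega), hcnt]
      by_cases hka : k = a
      · subst hka
        simp
      · have hak : ¬ k = a := hka
        simp [hak]
    · rw [if_neg hkb, hc1]
      have hcnt : (t ++ [b]).count k = t.count k := by
        have : List.count k [b] = 0 := by
          simp [List.count_singleton]
          exact fun h => hkb h.symm
        simp [List.count_append, this]
      by_cases hka : k = a
      · subst hka
        rw [if_pos rfl, hcnt, if_neg hta]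
        have h1 : (k :: t).count k = t.count k + 1 := by simp [List.count_cons]
        rw [h1]
        congr 1
        push_cast
        ring
      · rw [if_neg hka, hinv k, counter_get?, hcnt]
        have hak2 : ¬ a = k := fun h => hka h.symm
        have : (a :: t).count k = t.count k := by simp [List.count_cons, hak2]
        rw [this]

theorem loopB (req : PySem.Dict String Int) :
    ∀ (rest w : List String) (cur : PySem.Dict String Int) (ans : Int), w ≠ [] →
    (∀ k, cur.get? k = (PySem.Dict.counter w).get? k) →
    (((w ++ rest).zip rest).foldl (slideStep req) (cur, ans)).2
      = ans + ((winsTail w rest).countP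
          (fun v => pyDictEq req (PySem.Dict.counter v)) : Int) := by
  intro rest
  induction rest with
  | nil =>
    intro w cur ans _ _
    simp [winsTail]
  | cons b rest ih =>
    intro w cur ans hw hinv
    obtain ⟨a, t, rfl⟩ : ∃ a t, w = a :: t := by
      cases w with
      | nil => exact absurd rfl hw
      | cons a t => exact ⟨a, t, rfl⟩
    have hzip : ((a :: t) ++ b :: rest).zip (b :: rest)
        = (a, b) :: (((t ++ [b]) ++ rest).zip rest) := by
      simp [List.zip]
    rw [hzip, List.foldl_cons]
    have hinv' := step_inv a b t cur req ans hinv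
    have hstep2 : (slideStep req (cur, ans) (a, b)).2
        = if pyDictEq req (PySem.Dict.counter (t ++ [b])) then ans + 1 else ans := by
      have h0 : (slideStep req (cur, ans) (a, b)).2
          = if pyDictEq (slideStep req (cur, ans) (a, b)).1 req then ans + 1 else ans := rfl
      rw [h0, pyDictEq_of_pointwise _ _ req hinv']
    have := ih (t ++ [b]) (slideStep req (cur, ans) (a, b)).1
        (slideStep req (cur, ans) (a, b)).2 (by simp) hinv'
    rw [show (slideStep req (cur, ans) (a, b))
          = ((slideStep req (cur, ans) (a, b)).1, (slideStep req (cur, ans) (a, b)).2) from rfl] at this ⊢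
    rw [this, hstep2]
    rw [show winsTail (a :: t) (b :: rest) = (t ++ [b]) :: winsTail (t ++ [b]) rest from rfl]
    rw [List.countP_cons]
    by_cases hp : pyDictEq req (PySem.Dict.counter (t ++ [b])) = true
    · simp [hp]; push_cast; ring
    · simp [hp]

theorem foldl_if_count {α : Type} (p : α → Bool) :
    ∀ (L : List α) (c : Int),
    L.foldl (fun acc x => if p x then acc + 1 else acc) c = c + L.countP p := by
  intro L
  induction L with
  | nil => simp
  | cons x L ih =>
    intro c
    rw [List.foldl_cons, ih, List.countP_cons]
    by_cases hp : p x = true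
    · simp [hp]; push_cast; ring
    · simp [hp]

theorem wins_eq {α : Type} :
    ∀ (l : List α), 10 ≤ l.length →
    (List.range (l.length - 9)).map (fun i => (l.drop i).take 10)
      = l.take 10 :: winsTail (l.take 10) (l.drop 10) := by
  intro l
  induction l with
  | nil => intro h; simp at h
  | cons x l' ih =>
    intro h
    by_cases h11 : (x :: l').length = 10
    · have h1 : (x :: l').length - 9 = 1 := by omega
      rw [h1]
      have hd : (x :: l').drop 10 = [] := by
        apply List.drop_eq_nil_of_le; omega
      simp [hd, winsTail]
    · have hlen : 10 ≤ l'.length := by simp at h h11 ⊢; omega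
      have h1 : (x :: l').length - 9 = (l'.length - 9) + 1 := by simp; omega
      rw [h1, List.range_succ_eq_map, List.map_cons, List.map_map]
      have hmap : (fun i => ((x :: l').drop i).take 10) ∘ Nat.succ
          = (fun i => (l'.drop i).take 10) := by
        funext i; simp
      rw [hmap, ih hlen]
      have hdrop : (x :: l').drop 10 = l'[9] :: l'.drop 10 := by
        have : (x :: l').drop 10 = l'.drop 9 := by simp
        rw [this, List.drop_eq_getElem_cons (by omega)]
        norm_num
      have htail : ((x :: l').take 10).tail ++ [l'[9]] = l'.take 10 := by
        have h9 : (x :: l').take 10 = x :: l'.take 9 := by rfl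
        rw [h9, List.tail_cons]
        conv_rhs => rw [show (10 : Nat) = 9 + 1 from rfl, List.take_add_one,
          List.getElem?_eq_getElem (show 9 < l'.length by omega)]
        rfl
      rw [hdrop]
      show _ = (x :: l').take 10 :: (((x :: l').take 10).tail ++ [l'[9]]) :: winsTail (((x :: l').take 10).tail ++ [l'[9]]) (l'.drop 10)
      rw [htail]
      simp

theorem build_eq :
    ∀ (want : List String) (s : Nat) (number : List Int) (d : PySem.Dict String Int),
    want.length + s ≤ number.length →
    buildMatchingA (PySem.List.enumerate want (s : Int)) number d
      = ((want.zip (number.drop s)).foldl (fun d pn => d.insert pn.1 pn.2) d) := by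
  intro want
  induction want with
  | nil => intro s number d h; simp [PySem.List.enumerate_nil, buildMatchingA]
  | cons p rest ih =>
    intro s number d h
    rw [PySem.List.enumerate_cons]
    have hs : s < number.length := by simp at h; omega
    have hget : PySem.List.pyGet? number (s : Int) = some number[s] := by
      rw [PySem.List.pyGet?_natCast, List.getElem?_eq_getElem hs]
    rw [show buildMatchingA ((((s : Int)), p) :: PySem.List.enumerate rest ((s : Int) + 1)) number d
          = (match PySem.List.pyGet? number (s : Int) with
             | some v => buildMatchingA (PySem.List.enumerate rest ((s : Int) + 1)) number (d.insert p v)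
             | none => d) from rfl, hget]
    have hdrop : number.drop s = number[s] :: number.drop (s + 1) :=
      List.drop_eq_getElem_cons hs
    rw [hdrop]
    have hcast : ((s : Int) + 1) = ((s + 1 : Nat) : Int) := by push_cast; ring
    show buildMatchingA (PySem.List.enumerate rest ((s : Int) + 1)) number (d.insert p number[s]) = _
    rw [hcast, ih (s + 1) number (d.insert p number[s]) (by simp at h ⊢; omega)]
    rfl

theorem main_eq (want : List String) (number : List Int) (discount : List String)
    (hpre : want.length ≤ number.length) :
    solution want number discount = solution_alt want number discount := by
  have hmatch : buildMatchingA (PySem.List.enumerate want) number PySem.Dict.empty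
      = (want.zip number).foldl (fun d pn => d.insert pn.1 pn.2) PySem.Dict.empty := by
    have h := build_eq want 0 number PySem.Dict.empty (by omega)
    simpa using h
  set req := (want.zip number).foldl (fun d pn => d.insert pn.1 pn.2) PySem.Dict.empty with hreq
  by_cases hlen : discount.length < 10
  · simp only [solution, solution_alt, if_pos hlen]
    rw [PySem.List.pyRange_one_eq_nil (by push_cast; omega)]
    rfl
  · push_neg at hlen
    simp only [solution, solution_alt, if_neg (not_lt.mpr hlen)]
    rw [hmatch, ← hreq]
    -- A side: fold over the range = countP over the window list
    have hnat : (((discount.length : Int)) - 9 - 0).toNat = discount.length - 9 := by omega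
    rw [PySem.List.pyRange_one, hnat, List.foldl_map]
    have hbody : (fun (answer : Int) (k : Nat) =>
        if pyDictEq req (PySem.Dict.counter
            (PySem.List.slice discount (some ((k : Int)))
              (some ((k : Int) + 10)))) then answer + 1 else answer)
        = (fun (answer : Int) (k : Nat) =>
            if (fun k => pyDictEq req (PySem.Dict.counter ((discount.drop k).take 10))) k
            then answer + 1 else answer) := by
      funext answer k
      have h10 : ((k : Int) + 10) = ((k : Int) + ((10 : Nat) : Int)) := by norm_num
      rw [h10, PySem.List.slice_natCast_add]
    simp only [zero_add]
    rw [hbody, foldl_if_count]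
    have hcomp : (fun k => pyDictEq req (PySem.Dict.counter ((discount.drop k).take 10)))
        = (fun w => pyDictEq req (PySem.Dict.counter w)) ∘ (fun k => (discount.drop k).take 10) := rfl
    rw [hcomp, ← List.countP_map]
    rw [wins_eq discount hlen]
    -- B side
    have hcur : (discount.take 10).foldl (fun d p => d.insert p (d.getD p 0 + 1)) PySem.Dict.empty
        = PySem.Dict.counter (discount.take 10) :=
      PySem.Dict.foldl_insert_getD_add_one_eq_counter (discount.take 10)
    rw [hcur]
    have hsplit : discount.zip (discount.drop 10)
        = ((discount.take 10) ++ (discount.drop 10)).zip (discount.drop 10) := by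
      rw [List.take_append_drop]
    rw [hsplit, loopB req (discount.drop 10) (discount.take 10)
        (PySem.Dict.counter (discount.take 10)) _
        (by
          have h10 : (discount.take 10).length = 10 := by rw [List.length_take]; omega
          intro h
          rw [h] at h10
          simp at h10)
        (fun k => rfl)]
    have hfirst : pyDictEq (PySem.Dict.counter (discount.take 10)) req
        = pyDictEq req (PySem.Dict.counter (discount.take 10)) :=
      pyDictEq_of_pointwise _ _ req (fun k => rfl)
    rw [hfirst, List.countP_cons]
    by_cases hp : pyDictEq req (PySem.Dict.counter (discount.take 10)) = true
    · simp [hp]; push_cast; ring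
    · simp [hp]

-- ===== VERDICT (by name: the statement is the Claim_ definition above) =====
theorem solution_spec : Claim_equal_solution := by
  intro want number discount _ hpre
  unfold Spec_solution
  exact main_eq want number discount hpre
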